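-- pv_equiv track=rewrite | github.com/Tianennnn/Linear-Programming-Solver | lp_solver.py | is_unbounded
-- ===== SOURCE A (Python) =====
-- def is_unbounded(dict)->bool:
--     """
--     A dictionary is unbounded if the coefficients of the non-basic variable in a
--     column are all positive.
--     """
--     for i in range(1,len(dict[0])):
--         if (dict[0][i]>0):
--             for j in range(1, len(dict)):
--                 if (dict[j][i+1]<0):
--                     break
--                 if j == (len(dict)-1):
--                     return True
--     return False
-- ===== SOURCE B (Python) =====
-- def is_unbounded(dict) -> bool:
--     # Staged re-implementation: pass 1 builds an index of disqualified columns
--     # (a set of column numbers that have a negative constraint coefficient),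
--     # pass 2 scans the objective row against that index.
--     bad = set()
--     for row in dict[1:]:
--         bad.update(idx - 1 for idx, v in enumerate(row) if v < 0)
--     if len(dict) <= 1:
--         return False
--     for i in range(1, len(dict[0])):
--         if dict[0][i] > 0 and i not in bad:
--             return True
--     return False
-- ===== Notes on version B (the rewrite author's own statement) =====
-- stated objective: alternative
-- what changed: A rescans the constraint rows afresh for every positive objective column (nested loops with break and last-index bookkeeping); B makes two staged passes: one pass over the constraint rows builds a set of disqualified column numbers, then a single scan of the objective row checks membership in that index.
import Mathlib
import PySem

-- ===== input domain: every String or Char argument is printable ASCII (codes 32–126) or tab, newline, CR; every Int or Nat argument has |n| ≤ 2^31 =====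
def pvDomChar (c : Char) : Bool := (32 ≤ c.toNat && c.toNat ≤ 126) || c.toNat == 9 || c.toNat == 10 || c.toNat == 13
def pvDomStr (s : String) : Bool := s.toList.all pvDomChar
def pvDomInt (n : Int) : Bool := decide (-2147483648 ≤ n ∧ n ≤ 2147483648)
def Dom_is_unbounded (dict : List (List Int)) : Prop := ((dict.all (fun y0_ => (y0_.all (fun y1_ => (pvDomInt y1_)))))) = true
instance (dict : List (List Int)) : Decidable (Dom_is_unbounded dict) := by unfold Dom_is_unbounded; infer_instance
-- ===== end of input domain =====

-- B replaces A's per-column rescan of the constraint rows by two staged passes: one pass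
-- indexes the disqualified columns into a set, a second scans the objective row (objective: alternative).

-- ===== PORT A =====
-- inner loop 'for j in range(1, len(dict)): …' with break / 'if j == len(dict)-1: return True'
-- dict[j][i+1] is pyGetD; the out-of-range case is an IndexError in Python, excluded by Pre_
def aInner (dict : List (List Int)) (i : Int) : List Int → Bool
  | [] => false
  | j :: rest =>
    if PySem.List.pyGetD (PySem.List.pyGetD dict j []) (i + 1) 0 < 0 then false
    else if j == (dict.length : Int) - 1 then true
    else aInner dict i rest

-- outer loop 'for i in range(1, len(dict[0])): …'
def aOuter (dict : List (List Int)) (row0 : List Int) : List Int → Bool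
  | [] => false
  | i :: rest =>
    if PySem.List.pyGetD row0 i 0 > 0 then
      if aInner dict i (PySem.List.pyRange 1 (dict.length : Int) 1) then true
      else aOuter dict row0 rest
    else aOuter dict row0 rest

def is_unbounded (dict : List (List Int)) : Bool :=
  let row0 := PySem.List.pyGetD dict 0 []   -- dict[0]; dict = [] raises in Python, excluded by Pre_
  aOuter dict row0 (PySem.List.pyRange 1 (row0.length : Int) 1)

-- ===== PORT B =====
-- pass 1: 'for row in dict[1:]: bad.update(idx - 1 for idx, v in enumerate(row) if v < 0)'
def bBad (rows : List (List Int)) : PySem.Set Int :=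
  rows.foldl
    (fun s row =>
      PySem.Set.update s
        (((PySem.List.enumerate row 0).filter (fun p => decide (p.2 < 0))).map (fun p => p.1 - 1)))
    PySem.Set.empty

-- pass 2: 'for i in range(1, len(dict[0])): if dict[0][i] > 0 and i not in bad: return True'
def bScan (row0 : List Int) (bad : PySem.Set Int) : List Int → Bool
  | [] => false
  | i :: rest =>
    if PySem.List.pyGetD row0 i 0 > 0 && !(PySem.Set.contains bad i) then true
    else bScan row0 bad rest

def is_unbounded_alt (dict : List (List Int)) : Bool :=
  let bad := bBad (PySem.List.slice dict (some 1) none)          -- dict[1:]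
  if dict.length ≤ 1 then false
  else
    let row0 := PySem.List.pyGetD dict 0 []                      -- dict[0]; in range here
    bScan row0 bad (PySem.List.pyRange 1 (row0.length : Int) 1)

-- ===== PRECONDITION & SPEC =====
-- Pre_ excludes exactly the inputs on which A raises IndexError: the empty list, and
-- inputs where some positive objective column, scanning the constraint rows in order,
-- reaches a row shorter than i+2 before any negative entry (the break), while every
-- earlier positive column broke on a negative entry (so A is still running).
def Pre_is_unbounded (dict : List (List Int)) : Prop :=
  dict ≠ [] ∧
  ¬ ∃ i ∈ PySem.List.pyRange 1 (((dict.headD []).length : Int)) 1,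
      0 < (PySem.List.pyGet? (dict.headD []) i).getD 0 ∧
      (∃ j ∈ PySem.List.pyRange 1 ((dict.length : Int)) 1,
        ¬ (i + 2 ≤ ((dict.getD j.toNat []).length : Int)) ∧
        ∀ j' ∈ PySem.List.pyRange 1 j 1,
          i + 2 ≤ ((dict.getD j'.toNat []).length : Int) ∧
          0 ≤ (PySem.List.pyGet? (dict.getD j'.toNat []) (i + 1)).getD 0) ∧
      ∀ i' ∈ PySem.List.pyRange 1 i 1,
        0 < (PySem.List.pyGet? (dict.headD []) i').getD 0 →
        ∃ j ∈ PySem.List.pyRange 1 ((dict.length : Int)) 1,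
          i' + 2 ≤ ((dict.getD j.toNat []).length : Int) ∧
          ¬ (0 ≤ (PySem.List.pyGet? (dict.getD j.toNat []) (i' + 1)).getD 0) ∧
          ∀ j' ∈ PySem.List.pyRange 1 j 1,
            i' + 2 ≤ ((dict.getD j'.toNat []).length : Int) ∧
            0 ≤ (PySem.List.pyGet? (dict.getD j'.toNat []) (i' + 1)).getD 0
instance (dict : List (List Int)) : Decidable (Pre_is_unbounded dict) := by
  unfold Pre_is_unbounded; infer_instance
def pvWitness_is_unbounded : List (List Int) := [[0, 2, -1], [1, 1, 1, 1], [2, -1, 3, 0]]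

def Spec_is_unbounded (dict : List (List Int)) (out : Bool) : Prop := out = is_unbounded_alt dict
instance (dict : List (List Int)) (out : Bool) : Decidable (Spec_is_unbounded dict out) := by unfold Spec_is_unbounded; infer_instance

-- ===== CLAIM (what is proved, stated in full; the proofs are below) =====
def Claim_equal_is_unbounded : Prop := ∀ (dict : List (List Int)), Dom_is_unbounded dict → Pre_is_unbounded dict → Spec_is_unbounded dict (is_unbounded dict)

-- ===== LEMMAS AND PROOFS =====

lemma bScan_any (row0 : List Int) (bad : PySem.Set Int) (l : List Int) :
    bScan row0 bad l =
      l.any (fun i => decide (PySem.List.pyGetD row0 i 0 > 0) && !(PySem.Set.contains bad i)) := by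
  induction l with
  | nil => rfl
  | cons i rest ih =>
    simp only [bScan, List.any_cons, ih]
    cases hc : PySem.Set.contains bad i
    · by_cases h : PySem.List.pyGetD row0 i 0 > 0 <;> simp [h]
    · simp

lemma aOuter_any (dict : List (List Int)) (row0 : List Int) (l : List Int) :
    aOuter dict row0 l =
      l.any (fun i =>
        decide (PySem.List.pyGetD row0 i 0 > 0) &&
        aInner dict i (PySem.List.pyRange 1 (dict.length : Int) 1)) := by
  induction l with
  | nil => rfl
  | cons i rest ih =>
    simp only [aOuter, List.any_cons, ih]
    by_cases h : PySem.List.pyGetD row0 i 0 > 0 <;>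
      cases aInner dict i (PySem.List.pyRange 1 (dict.length : Int) 1) <;>
      simp [h]

lemma mem_foldl_update (rows : List (List Int)) (f : List Int → List Int)
    (s : PySem.Set Int) (y : Int) :
    y ∈ rows.foldl (fun s row => PySem.Set.update s (f row)) s ↔
      y ∈ s ∨ ∃ row ∈ rows, y ∈ f row := by
  induction rows generalizing s with
  | nil => simp
  | cons r rs ih =>
    simp only [List.foldl_cons, ih, PySem.Set.mem_update, List.mem_cons]
    constructor
    · rintro ((hy | hy) | ⟨row, hrow, hy⟩)
      · exact Or.inl hy
      · exact Or.inr ⟨r, Or.inl rfl, hy⟩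
      · exact Or.inr ⟨row, Or.inr hrow, hy⟩
    · rintro (hy | ⟨row, (rfl | hrow), hy⟩)
      · exact Or.inl (Or.inl hy)
      · exact Or.inl (Or.inr hy)
      · exact Or.inr ⟨row, hrow, hy⟩

lemma mem_bBad (rows : List (List Int)) (y : Int) :
    y ∈ bBad rows ↔ ∃ row ∈ rows, ∃ p ∈ PySem.List.enumerate row 0, p.2 < 0 ∧ p.1 - 1 = y := by
  unfold bBad
  rw [mem_foldl_update]
  simp [PySem.Set.empty, List.mem_map, List.mem_filter, and_assoc]

-- the condition both ports test on column i against constraint row 'row'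
lemma bad_contains_iff (rows : List (List Int)) (i : Int) (hi : 1 ≤ i) :
    PySem.Set.contains (bBad rows) i = true ↔
      ∃ row ∈ rows, PySem.List.pyGetD row (i + 1) 0 < 0 := by
  rw [PySem.Set.contains_iff, mem_bBad]
  apply exists_congr; intro row
  apply and_congr_right; intro _
  simp only [PySem.List.mem_enumerate_iff]
  constructor
  · rintro ⟨p, ⟨k, hk, rfl⟩, hneg, heq⟩
    simp only [zero_add] at hneg heq
    have : i + 1 = ((k : Nat) : Int) := by omega
    rw [this, PySem.List.pyGetD_natCast, List.getD_eq_getElem _ _ hk]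
    exact hneg
  · intro hneg
    have h0 : (0 : Int) ≤ i + 1 := by omega
    rw [PySem.List.pyGetD_of_nonneg _ _ h0] at hneg
    have hk : (i + 1).toNat < row.length := by
      by_contra hge
      rw [List.getD_eq_default _ _ (by omega)] at hneg
      omega
    refine ⟨((0 : Int) + (i+1).toNat, row[(i+1).toNat]), ⟨(i+1).toNat, hk, rfl⟩, ?_, by omega⟩
    rw [List.getD_eq_getElem _ _ hk] at hneg
    exact hneg

lemma aInner_true_iff (dict : List (List Int)) (i : Int) (j : Int)
    (h1 : 1 ≤ j) (hj : j < (dict.length : Int)) :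
    aInner dict i (PySem.List.pyRange j (dict.length : Int) 1) = true ↔
      ∀ k, j ≤ k → k < (dict.length : Int) →
        ¬ PySem.List.pyGetD (PySem.List.pyGetD dict k []) (i + 1) 0 < 0 := by
  generalize hfuel : ((dict.length : Int) - j).toNat = m
  induction m generalizing j with
  | zero => omega
  | succ m ih =>
    rw [PySem.List.pyRange_one_cons hj]
    simp only [aInner]
    by_cases hneg : PySem.List.pyGetD (PySem.List.pyGetD dict j []) (i + 1) 0 < 0
    · simp only [if_pos hneg, Bool.false_eq_true, false_iff]
      intro h
      exact h j le_rfl hj hneg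
    · simp only [if_neg hneg]
      by_cases hlast : j = (dict.length : Int) - 1
      · simp only [hlast, beq_self_eq_true, if_true, true_iff]
        intro k hk1 hk2
        have : k = j := by omega
        subst hlast; subst this
        exact hneg
      · have hbeq : (j == (dict.length : Int) - 1) = false := by simp [hlast]
        rw [hbeq]
        simp only [Bool.false_eq_true, if_false]
        rw [ih (j + 1) (by omega) (by omega) (by omega)]
        constructor
        · intro h k hk1 hk2
          rcases eq_or_lt_of_le hk1 with rfl | hlt
          · exact hneg
          · exact h k (by omega) hk2
        · intro h k hk1 hk2
          exact h k (by omega) hk2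

lemma cell_forall_iff (r0 : List Int) (rows : List (List Int)) (i : Int) :
    (∀ k : Int, 1 ≤ k → k < (((r0 :: rows).length : Int)) →
        ¬ PySem.List.pyGetD (PySem.List.pyGetD (r0 :: rows) k []) (i + 1) 0 < 0) ↔
      ∀ row ∈ rows, ¬ PySem.List.pyGetD row (i + 1) 0 < 0 := by
  constructor
  · intro h row hrow
    obtain ⟨m, hm, rfl⟩ := List.getElem_of_mem hrow
    have hk := h ((m : Int) + 1) (by omega) (by simp; omega)
    have hcast : ((m : Int) + 1) = (((m + 1 : Nat)) : Int) := by push_cast; ring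
    rw [hcast, PySem.List.pyGetD_natCast, List.getD_cons_succ,
      List.getD_eq_getElem _ _ hm] at hk
    exact hk
  · intro h k hk1 hk2
    obtain ⟨m, hm⟩ : ∃ m, k.toNat = m + 1 := ⟨k.toNat - 1, by omega⟩
    have hmlt : m < rows.length := by simp at hk2; omega
    rw [PySem.List.pyGetD_of_nonneg _ _ (by omega : (0:Int) ≤ k), hm,
      List.getD_cons_succ, List.getD_eq_getElem _ _ hmlt]
    exact h rows[m] (List.getElem_mem hmlt)

-- ===== VERDICT (by name: the statement is the Claim_ definition above) =====
theorem is_unbounded_spec : Claim_equal_is_unbounded := by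
  intro dict _ hpre
  obtain ⟨hne, -⟩ := hpre
  unfold Spec_is_unbounded
  cases dict with
  | nil => exact absurd rfl hne
  | cons r0 rows =>
    cases rows with
    | nil =>
      simp [is_unbounded, is_unbounded_alt, aOuter_any, aInner,
        PySem.List.pyRange_one_eq_nil]
    | cons r rs =>
      rw [is_unbounded, is_unbounded_alt]
      have hlen : ¬ (r0 :: r :: rs).length ≤ 1 := by simp
      simp only [if_neg hlen, PySem.List.slice_from_one, List.tail_cons]
      rw [aOuter_any, bScan_any]
      have hrow0 : PySem.List.pyGetD (r0 :: r :: rs) 0 [] = r0 := by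
        simp [PySem.List.pyGetD_ofNat']
      rw [hrow0]
      rw [Bool.eq_iff_iff, List.any_eq_true, List.any_eq_true]
      apply exists_congr
      intro i
      apply and_congr_right
      intro hi
      have hi1 : 1 ≤ i := (PySem.List.mem_pyRange_one.mp hi).1
      rw [Bool.and_eq_true, Bool.and_eq_true]
      apply and_congr_right
      intro _
      rw [aInner_true_iff _ _ 1 le_rfl (by simp), cell_forall_iff]
      rw [Bool.not_eq_true', ← Bool.not_eq_true, bad_contains_iff _ _ hi1]
      push Not
      rfl
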